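/- GENERATED by mk_final_copies.py from the proof of the farm's unit `vorbis_deinit.2` (farm:vorbis_deinit.2.1: Lemmas.lean) as the
   re-elaboration sweep compiled it — do not edit. -/
import Asan.CheckWalk
import Vorbis.Spec.Units.vorbis_deinit_2

open X86 X86.User Asan Vorbis Vorbis.Spec

set_option maxRecDepth 4000
set_option maxHeartbeats 4000000

namespace Vorbis.Spec.vorbis_deinit_2

variable {cut cut' : Word} {others : List Obj} {frames : List (Nat × FrameLayout)} {Blk : Block → Prop} {u₀ e v r : State}
  {ret : Word}

/-- **The assertion `At` moves to a later state** `r` of the same call of `vorbis_deinit`: the stack pointer, `rbx` and `r15`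
are those of `v`, and nothing was stored since `v` but below the five saved registers (the return addresses of the calls, the
callees' frames: `[e.rsp − 96, e.rsp − 40)`). Every straight-line piece of the segment ends with this lemma. -/
theorem at_move (hat : vorbis_deinit.At cut others frames Blk u₀ e ret v)
    (hsame : Mem.SameExcept [⟨(e.reg .rsp).toNat - 96, (e.reg .rsp).toNat - 40⟩] v.mem r.mem)
    (hrip : r.rip = cut') (hrsp : r.reg .rsp = v.reg .rsp) (hrbx : r.reg .rbx = v.reg .rbx)
    (hr15 : r.reg .r15 = v.reg .r15) (hcode : (conv u₀).code.In r.mem) (hinv : (conv u₀).inv r) :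
    vorbis_deinit.At cut' others frames Blk u₀ e ret r := by
  have hroom := hat.entry.room
  have htop := hat.entry.top
  simp only [vspec, conv_stackLo] at hroom
  simp only [conv_stackHi] at htop
  -- a slot of the five saved registers is above the window
  have slot : ∀ k : Nat, 8 ≤ k → k ≤ 40 → r.mem.readLE (e.reg .rsp - UInt64.ofNat k) 8 =
      v.mem.readLE (e.reg .rsp - UInt64.ofNat k) 8 := by
    intro k hk1 hk2
    have hle : UInt64.ofNat k ≤ e.reg .rsp := by
      rw [UInt64.le_iff_toNat_le, UInt64.toNat_ofNat', Nat.mod_eq_of_lt (by omega)]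
      omega
    have ek : (e.reg .rsp - UInt64.ofNat k).toNat = (e.reg .rsp).toNat - k := by
      rw [UInt64.toNat_sub_of_le _ _ hle, UInt64.toNat_ofNat', Nat.mod_eq_of_lt (by omega)]
    apply hsame.readLE _ 8 (by omega)
    intro w hw
    have e1 : w = ⟨(e.reg .rsp).toNat - 96, (e.reg .rsp).toNat - 40⟩ := List.mem_singleton.mp hw
    subst e1
    simp only
    omega
  refine ⟨hat.entry, hat.pre, hrip, ?_, ?_, ?_, ?_, ?_, ?_, ?_, ?_, ?_, hcode, hinv⟩
  · rw [hrsp]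
    exact hat.rsp
  · rw [hrbx]
    exact hat.rbx
  · rw [hr15]
    exact hat.r15
  · rw [← hat.slot_r14]
    exact slot 8 (by omega) (by omega)
  · rw [← hat.slot_r13]
    exact slot 16 (by omega) (by omega)
  · rw [← hat.slot_r12]
    exact slot 24 (by omega) (by omega)
  · rw [← hat.slot_rbp]
    exact slot 32 (by omega) (by omega)
  · rw [← hat.slot_rbx]
    exact slot 40 (by omega) (by omega)
  · apply hat.same.step_same hsame
    intro w hw a h1 h2
    have e1 : w = ⟨(e.reg .rsp).toNat - 96, (e.reg .rsp).toNat - 40⟩ := List.mem_singleton.mp hw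
    subst e1
    refine ⟨_, List.mem_singleton.mpr rfl, ?_, ?_⟩
    · exact h1
    · have : a < (e.reg .rsp).toNat - 40 := h2
      show a < (e.reg .rsp).toNat
      omega


/-! ### The shared hypotheses, and what every piece reads off the assertion -/

/-- The hypotheses that the statement of the unit shares with every piece of its proof: the layout, the microarchitecture, the
bytes of `vorbis_deinit`, and the contracts of the three callees. -/
structure D2Hyp (Lay : Layout) (μ : Microarch) (u₀ : State) : Prop where
  lay : Lay.hi = 0x1000000
  micro : UserX.MicroOK μ
  code : HasCodeNat Lay u₀ Vorbis.L.vorbis_deinit.entry Vorbis.Code.code_vorbis_deinit.nat Vorbis.L.vorbis_deinit.size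
  load8 : Asan.SmallCheck Lay μ Vorbis.WayInv (Vorbis.CodeOK u₀) [.rax, .rcx, .rdx] 8 Vorbis.L.__asan_load8_noabort.entry
  free : ∀ (others : List Obj) (frames : List (Nat × FrameLayout)),
    Calls Lay μ Vorbis.WayInv (Vorbis.conv u₀) Vorbis.L.setup_free.entry (Vorbis.Spec.setup_free.spec others frames)
  load4 : Asan.SmallCheck Lay μ Vorbis.WayInv (Vorbis.CodeOK u₀) [.rax, .rcx, .rdx] 4 Vorbis.L.__asan_load4_noabort.entry

/-- **What a piece of the segment reads off the assertion `At`** at its first state `v`: the walker's register facts, the code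
span, DF / MXCSR / SSE, PRE-D in the present memory, the shadow layer at the present stack pointer, where `*p` is, and the four
fields of `*p` that the two loops test, equal to their values at the function's entry (H6). -/
structure D2Ctx (others : List Obj) (frames : List (Nat × FrameLayout)) (Blk : Block → Prop) (u₀ e v : State) : Prop where
  rsp : v.reg .rsp = e.reg .rsp - 40
  rbx : v.reg .rbx = e.reg .rdi
  eq : Mem.EqOn Vorbis.L.textLo Vorbis.L.textHi u₀.mem v.mem
  df : v.flags .df = false
  mx : v.mxcsr &&& 0x1F80 = 0x1F80
  sse : SseOK v
  live : BlkLive Blk (Live (stackObjs frames ++ others))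
  ok : BlkOK Blk
  d : DeinitOK Blk v.mem (e.reg .rdi).toNat
  wp : 0x119d40 ≤ (e.reg .rdi).toNat ∧ (e.reg .rdi).toNat + 1808 ≤ 0xC00000 ∧
    ((e.reg .rsp).toNat + 8 ≤ (e.reg .rdi).toNat ∨ (e.reg .rdi).toNat + 1808 ≤ 0x700000 ∨ 0x800000 ≤ (e.reg .rdi).toNat)
  cbs : stb_vorbis.codebooks v.mem (e.reg .rdi).toNat = stb_vorbis.codebooks e.mem (e.reg .rdi).toNat
  cbc : stb_vorbis.codebook_count v.mem (e.reg .rdi).toNat = stb_vorbis.codebook_count e.mem (e.reg .rdi).toNat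
  mps : stb_vorbis.mapping v.mem (e.reg .rdi).toNat = stb_vorbis.mapping e.mem (e.reg .rdi).toNat
  mpc : stb_vorbis.mapping_count v.mem (e.reg .rdi).toNat = stb_vorbis.mapping_count e.mem (e.reg .rdi).toNat

/-- The context of a piece, from the assertion. -/
theorem d2_ctx (hat : vorbis_deinit.At cut others frames Blk u₀ e ret v) : D2Ctx others frames Blk u₀ e v := by
  obtain ⟨hsh, hok, hlive, hd0⟩ := hat.pre
  have hroom := hat.entry.room
  simp only [vspec, conv_stackLo] at hroom
  have hd : DeinitOK Blk v.mem (e.reg .rdi).toNat := by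
    have h := hat.deinitOK
    rw [hat.rbx] at h
    exact h
  have hk := hat.allKept _ hd0.ob1.blk
  refine ⟨hat.rsp, hat.rbx, Vorbis.conv_code_eqOn hat.code, (show abiInv _ from hat.inv).1, (show abiInv _ from hat.inv).2,
    Vorbis.sseOK_of_abiInv hat.inv, hlive, hok, hd, ?_, ?_, ?_, ?_, ?_⟩
  · exact ObjLive.where_ (ObjLive.of_ob1 hlive hd0.ob1) hsh.inv hsh.offText (by omega)
  · simp only [vacc, voff]
    exact hk.u64 _ (by simp only [vblock]; omega) (by simp only [vblock, voff]; omega)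
  · simp only [vacc, voff]
    exact hk.i32 _ (by simp only [vblock]; omega) (by simp only [vblock, voff]; omega)
  · simp only [vacc, voff]
    exact hk.u64 _ (by simp only [vblock]; omega) (by simp only [vblock, voff]; omega)
  · simp only [vacc, voff]
    exact hk.i32 _ (by simp only [vblock]; omega) (by simp only [vblock, voff]; omega)

/-- **A check site inside `*p`** (OB1): the `n` bytes at offset `off`, in a memory whose shadow is that of the piece's first
state. -/
theorem chk_obj (hat : vorbis_deinit.At cut others frames Blk u₀ e ret v) {mem' : Mem} (hun : ShadowUntouched v.mem mem')
    (off n : Nat) (hin : off + n ≤ Off.sizeof.stb_vorbis) (hn : 1 ≤ n) (b : Word)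
    (hb : b.toNat = (e.reg .rdi).toNat + off) : AccSmall n mem' b := by
  have c := d2_ctx hat
  exact Vorbis.Spec.check_site hat.shadow hun (c.d.ob1.site c.live off n hin hn rfl) hb

/-- **A check site inside `codebooks[i]`**, `i < codebook_count` (H4). -/
theorem chk_codebook (hat : vorbis_deinit.At cut others frames Blk u₀ e ret v) {mem' : Mem}
    (hun : ShadowUntouched v.mem mem') (hnz : stb_vorbis.codebooks e.mem (e.reg .rdi).toNat ≠ 0) (i : Nat)
    (hi : (i : Int) < stb_vorbis.codebook_count e.mem (e.reg .rdi).toNat) (off n : Nat)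
    (hin : off + n ≤ Off.sizeof.Codebook) (hn : 1 ≤ n) (b : Word)
    (hb : b.toNat = stb_vorbis.codebooks e.mem (e.reg .rdi).toNat + 2120 * i + off) : AccSmall n mem' b := by
  have c := d2_ctx hat
  refine Vorbis.Spec.check_site hat.shadow hun
    (c.d.site_codebook c.live (by rw [c.cbs]; exact hnz) i (by rw [c.cbc]; exact hi) off n hin hn rfl) ?_
  rw [hb]
  simp only [vacc, voff]
  have := c.cbs
  simp only [vacc, voff] at this
  rw [this]

/-- **A check site inside `mapping[i]`**, `i < mapping_count` (H5; stride 56: FIX 8). -/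
theorem chk_mapping (hat : vorbis_deinit.At cut others frames Blk u₀ e ret v) {mem' : Mem}
    (hun : ShadowUntouched v.mem mem') (hnz : stb_vorbis.mapping e.mem (e.reg .rdi).toNat ≠ 0) (i : Nat)
    (hi : (i : Int) < stb_vorbis.mapping_count e.mem (e.reg .rdi).toNat) (off n : Nat)
    (hin : off + n ≤ Off.sizeof.Mapping) (hn : 1 ≤ n) (b : Word)
    (hb : b.toNat = stb_vorbis.mapping e.mem (e.reg .rdi).toNat + 56 * i + off) : AccSmall n mem' b := by
  have c := d2_ctx hat
  refine Vorbis.Spec.check_site hat.shadow hun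
    (c.d.site_mapping c.live (by rw [c.mps]; exact hnz) i (by rw [c.mpc]; exact hi) off n hin hn rfl) ?_
  rw [hb]
  simp only [vacc, voff]
  have := c.mps
  simp only [vacc, voff] at this
  rw [this]

/-- **The precondition of `setup_free(p, q)`** at a call site of the segment: the stack pointer is 8 below the piece's (the return
address was pushed), `rdi = p`, no shadow byte was written. -/
theorem pre_free (hat : vorbis_deinit.At cut others frames Blk u₀ e ret v) {s : State}
    (hun : ShadowUntouched v.mem s.mem) (hrsp : s.reg .rsp = e.reg .rsp - 48) (hrdi : s.reg .rdi = e.reg .rdi) :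
    (setup_free.spec others frames).pre s := by
  have c := d2_ctx hat
  have hroom := hat.entry.room
  have htop := hat.entry.top
  have hal := hat.entry.align
  simp only [vspec, conv_stackLo] at hroom
  simp only [conv_stackHi] at htop
  have hv := hat.rsp_toNat
  have hs : (s.reg .rsp).toNat = (e.reg .rsp).toNat - 48 := by
    rw [hrsp]
    have hle : (48 : Word) ≤ e.reg .rsp := by
      rw [UInt64.le_iff_toNat_le]
      have : (48 : Word).toNat = 48 := rfl
      omega
    rw [UInt64.toNat_sub_of_le _ _ hle]
    rfl
  refine ⟨⟨?_, hat.pre.1.offText⟩, ?_⟩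
  · exact (hat.shadow.untouched hun).lower (by omega) (by omega) (by omega)
  · rw [hrdi]
    exact ObjLive.of_ob1 c.live c.d.ob1

/-! ### Pure facts about the loop counter `r12d` and the element addresses -/

/-- `movsxd r, r12d` of a small counter is the counter. -/
theorem sext_small (w : Word) (i : Nat) (h : w.toNat = i) (hi : i < 2 ^ 31) :
    Word.ofBV (BitVec.signExtend 64 (Word.part .w32 w)) = addr i := by
  apply UInt64.toNat_inj.mp
  have hp : (Word.part .w32 w).toNat = i := by
    rw [toNat_part32, h]
    omega
  rw [toNat_sext32 _ (by omega), hp, toNat_addr _ (by omega)]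

/-- The signed value of a small counter in `r12d`. -/
theorem s32_small (w : Word) (i : Nat) (h : w.toNat = i) (hi : i < 2 ^ 31) :
    (Word.part .w32 w).toInt = (i : Int) := by
  have hp : (Word.part .w32 w).toNat = i := by
    rw [toNat_part32, h]
    omega
  rw [toInt_of_lt _ (by omega), hp]

/-- `add r12d, 1` of a small counter. -/
theorem inc_small (w : Word) (i : Nat) (h : w.toNat = i) (hi : i < 2 ^ 31) :
    (Word.ofBV (Word.part .w32 w + 1#32)).toNat = i + 1 := by
  have hp : (Word.part .w32 w).toNat = i := by
    rw [toNat_part32, h]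
    omega
  rw [toNat_ofBV32, BitVec.toNat_add, hp]
  have : (1#32).toNat = 1 := rfl
  rw [this]
  omega

/-- The `int` a `cmp DWORD PTR [m], r32` reads, signed. -/
theorem cmp_i32 (mem : Mem) (a : Nat) : (BitVec.ofNat 32 (mem.u32 a)).toInt = mem.i32 a := by
  rw [toInt_ofNat32 _ (mem.u32_lt a)]
  rfl

/-- `lea rbp, [rax*8] ; sub rbp, rax ; shl rbp, 3` multiplies by 56 (FIX 8: `sizeof(Mapping)`). -/
theorem mul56 (x : Word) : (x * 8 - x) <<< 3 = x * 56 := by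
  bv_decide

/-- The address of `codebooks[i]`: `movsxd rbp, r12d ; imul rbp, rbp, 2120 ; add rbp, [rbx + 168]`. -/
theorem codebook_elem (i cb : Nat) : addr i * 2120 + UInt64.ofNat cb = addr (cb + 2120 * i) := by
  show addr i * 2120 + addr cb = _
  rw [addr_mul_lit, addr_add_addr]
  congr 1
  omega

/-- The address of `mapping[i]`: `… * 56 ; add rbp, [rbx + 472]`. -/
theorem mapping_elem (i mp : Nat) : (addr i * 8 - addr i) <<< 3 + UInt64.ofNat mp = addr (mp + 56 * i) := by
  rw [mul56]
  show addr i * 56 + addr mp = _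
  rw [addr_mul_lit, addr_add_addr]
  congr 1
  omega

/-! ### The assertions inside the two loops -/

/-- **At the head (or the back edge) of one of the two loops**: the assertion `At`, and the counter `i` in `r12`. -/
structure AtLoopHead (cut : Word) (others : List Obj) (frames : List (Nat × FrameLayout)) (Blk : Block → Prop) (u₀ e : State)
    (ret : Word) (i : Nat) (v : State) : Prop where
  base : vorbis_deinit.At cut others frames Blk u₀ e ret v
  r12 : (v.reg .r12).toNat = i
  le : i ≤ 256

/-- **Inside the body of one of the two loops**: the assertion `At`, the counter `i` in `r12`, below the bound `C` (the count
field at the function's entry), and the element's address `a` in `rbp`. -/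
structure AtIn (cut : Word) (others : List Obj) (frames : List (Nat × FrameLayout)) (Blk : Block → Prop) (u₀ e : State)
    (ret : Word) (C : Int) (a : Nat) (i : Nat) (v : State) : Prop where
  base : vorbis_deinit.At cut others frames Blk u₀ e ret v
  r12 : (v.reg .r12).toNat = i
  le : i ≤ 256
  lt : (i : Int) < C
  rbp : (v.reg .rbp).toNat = a

/-- Inside the body of the codebooks loop (stb_vorbis_fixed.c:4259): `i < codebook_count`, `rbp = codebooks + i`. -/
abbrev CbIn (cut : Word) (others : List Obj) (frames : List (Nat × FrameLayout)) (Blk : Block → Prop) (u₀ e : State)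
    (ret : Word) (i : Nat) (v : State) : Prop :=
  AtIn cut others frames Blk u₀ e ret (stb_vorbis.codebook_count e.mem (e.reg .rdi).toNat)
    (stb_vorbis.codebooks e.mem (e.reg .rdi).toNat + 2120 * i) i v

/-- Inside the body of the mapping loop (stb_vorbis_fixed.c:4273): `i < mapping_count`, `rbp = mapping + i`. -/
abbrev MpIn (cut : Word) (others : List Obj) (frames : List (Nat × FrameLayout)) (Blk : Block → Prop) (u₀ e : State)
    (ret : Word) (i : Nat) (v : State) : Prop :=
  AtIn cut others frames Blk u₀ e ret (stb_vorbis.mapping_count e.mem (e.reg .rdi).toNat)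
    (stb_vorbis.mapping e.mem (e.reg .rdi).toNat + 56 * i) i v

/-- Where the block of the codebooks is (H4): in the data space, off the stack below the entry rsp. -/
theorem where_codebooks (hat : vorbis_deinit.At cut others frames Blk u₀ e ret v)
    (hnz : stb_vorbis.codebooks e.mem (e.reg .rdi).toNat ≠ 0) :
    (stb_vorbis.codebook_count e.mem (e.reg .rdi).toNat ≤ 256) ∧
    (0 < stb_vorbis.codebook_count e.mem (e.reg .rdi).toNat →
      0x119d40 ≤ stb_vorbis.codebooks e.mem (e.reg .rdi).toNat ∧
      stb_vorbis.codebooks e.mem (e.reg .rdi).toNat +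
        2120 * (stb_vorbis.codebook_count e.mem (e.reg .rdi).toNat).toNat ≤ 0xC00000 ∧
      ((e.reg .rsp).toNat + 8 ≤ stb_vorbis.codebooks e.mem (e.reg .rdi).toNat ∨
        stb_vorbis.codebooks e.mem (e.reg .rdi).toNat +
          2120 * (stb_vorbis.codebook_count e.mem (e.reg .rdi).toNat).toNat ≤ 0x700000 ∨
        0x800000 ≤ stb_vorbis.codebooks e.mem (e.reg .rdi).toNat)) := by
  obtain ⟨hsh, hok, hlive, hd0⟩ := hat.pre
  have hroom := hat.entry.room
  simp only [vspec, conv_stackLo] at hroom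
  rcases hd0.h4 with hz | ⟨hc, hB⟩
  · exact absurd hz hnz
  · refine ⟨hc, ?_⟩
    intro hpos
    have := live_where (hlive _ hB) hsh.inv hsh.offText (by simp only [voff]; omega) (by omega)
    simp only [voff] at this
    exact this

/-- Where the block of the mappings is (H5): in the data space, off the stack below the entry rsp. -/
theorem where_mapping (hat : vorbis_deinit.At cut others frames Blk u₀ e ret v)
    (hnz : stb_vorbis.mapping e.mem (e.reg .rdi).toNat ≠ 0) :
    (stb_vorbis.mapping_count e.mem (e.reg .rdi).toNat ≤ 64) ∧
    (0 < stb_vorbis.mapping_count e.mem (e.reg .rdi).toNat →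
      0x119d40 ≤ stb_vorbis.mapping e.mem (e.reg .rdi).toNat ∧
      stb_vorbis.mapping e.mem (e.reg .rdi).toNat +
        56 * (stb_vorbis.mapping_count e.mem (e.reg .rdi).toNat).toNat ≤ 0xC00000 ∧
      ((e.reg .rsp).toNat + 8 ≤ stb_vorbis.mapping e.mem (e.reg .rdi).toNat ∨
        stb_vorbis.mapping e.mem (e.reg .rdi).toNat +
          56 * (stb_vorbis.mapping_count e.mem (e.reg .rdi).toNat).toNat ≤ 0x700000 ∨
        0x800000 ≤ stb_vorbis.mapping e.mem (e.reg .rdi).toNat)) := by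
  obtain ⟨hsh, hok, hlive, hd0⟩ := hat.pre
  have hroom := hat.entry.room
  simp only [vspec, conv_stackLo] at hroom
  rcases hd0.h5 with hz | ⟨hc, hB⟩
  · exact absurd hz hnz
  · refine ⟨hc, ?_⟩
    intro hpos
    have := live_where (hlive _ hB) hsh.inv hsh.offText (by simp only [voff]; omega) (by omega)
    simp only [voff] at this
    exact this

/-! ### The codebooks loop (stb_vorbis_fixed.c:4259 – 4267), piece by piece -/

variable {Lay : Layout} {μ : Microarch}

/-- 0x107773 (`cut12`, the head of the codebooks loop, stb_vorbis_fixed.c:4259 `i < p->codebook_count`): the checked load of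
`codebook_count`; EXIT (`jle`): the checked load of `p->codebooks`, `setup_free(p, p->codebooks)` (4268), which returns to `cut17`;
BODY: `c = p->codebooks + i` (4260), the checked load of `c->codeword_lengths` (`[rbp + 8]`), `setup_free` (4261), which returns
to `cut13`. -/
theorem piece_cut12 (H : D2Hyp Lay μ u₀) (hnz : stb_vorbis.codebooks e.mem (e.reg .rdi).toNat ≠ 0) {i : Nat}
    (hin : AtLoopHead Vorbis.L.vorbis_deinit.cut12 others frames Blk u₀ e ret i v) :
    ReachVia Lay μ WayInv v (fun r => vorbis_deinit.At Vorbis.L.vorbis_deinit.cut17 others frames Blk u₀ e ret r ∨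
      CbIn Vorbis.L.vorbis_deinit.cut13 others frames Blk u₀ e ret i r) := by
  obtain ⟨hLay, hμ, hcode, h8, hsf, h4⟩ := H
  obtain ⟨hat, c_r12, hile⟩ := hin
  have he := hat.entry
  v_entry he
  have c_rip := hat.rip
  obtain ⟨c_rsp, c_rbx, c_eq, hdf, hmx, hsse, hlive, hok, hd, hwp, hcbs, hcbc, -, -⟩ := d2_ctx hat
  have hsf' := hsf others frames
  obtain ⟨hc256, hwc⟩ := where_codebooks hat hnz
  -- the two fields the head loads, named
  have ea160 : e.reg .rdi + 160 = addr ((e.reg .rdi).toNat + 160) := by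
    rw [← addr_add_lit, addr_toNat]
  have ea168 : e.reg .rdi + 168 = addr ((e.reg .rdi).toNat + 168) := by
    rw [← addr_add_lit, addr_toNat]
  have r160 : v.mem.readLE (e.reg .rdi + 160) 4 = v.mem.u32 ((e.reg .rdi).toNat + 160) := by
    rw [ea160]
    rfl
  have r168 : v.mem.readLE (e.reg .rdi + 168) 8 = stb_vorbis.codebooks e.mem (e.reg .rdi).toNat := by
    rw [ea168, ← hcbs]
    rfl
  have hs32 := s32_small _ i c_r12 (by omega)
  have hsx := sext_small _ i c_r12 (by omega)
  have hcnt : (BitVec.ofNat 32 (v.mem.u32 ((e.reg .rdi).toNat + 160))).toInt =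
      stb_vorbis.codebook_count e.mem (e.reg .rdi).toNat := by
    rw [cmp_i32, ← hcbc]
    rfl
  u_walk hcode [hμ.vendor] span [Vorbis.L.textLo, Vorbis.L.textHi] side (v_side)
  case check_10777a =>
    have hun : ShadowUntouched v.mem s_10777a.mem := by v_untouched
    exact chk_obj hat hun 160 4 (by decide) (by decide) _ (by u_omega)
  -- the exit arm: `i ≥ codebook_count`
  case check_10782f =>
    have hun : ShadowUntouched v.mem s_10782f.mem := by v_untouched
    exact chk_obj hat hun 168 8 (by decide) (by decide) _ (by u_omega)
  case call_inv =>
    v_inv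
  case pre_10783e =>
    have hun : ShadowUntouched v.mem s_10783e.mem := by v_untouched
    exact pre_free hat hun w_rsp w_rdi
  -- the body arm: `i < codebook_count`
  case check_107793 =>
    have hun : ShadowUntouched v.mem s_107793.mem := by v_untouched
    exact chk_obj hat hun 168 8 (by decide) (by decide) _ (by u_omega)
  case check_1077ad =>
    have hun : ShadowUntouched v.mem s_1077ad.mem := by v_untouched
    rw [hs32, hcnt] at hbr_107786
    replace hwc := hwc (by omega)
    rw [hsx, codebook_elem]
    refine chk_codebook hat hun hnz i (by omega) 8 8 (by decide) (by decide) _ ?_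
    rw [addr_add_lit, toNat_addr _ (by omega)]
  case call_inv =>
    v_inv
  case pre_1077b9 =>
    have hun : ShadowUntouched v.mem s_1077b9.mem := by v_untouched
    exact pre_free hat hun w_rsp w_rdi
  · -- 0x107843 (`cut17`), the state `setup_free(p, p->codebooks)` returned
    v_after_call w_rsp_10783e w_mem_10783e
    refine ReachVia.done (Or.inl ?_)
    refine at_move hat ?_ w_rip ?_ (w_kept.get .rbx rfl) (w_kept.get .r15 rfl) w_code w_inv
    · u_same
    · rw [w_rsp, c_rsp]
  · -- 0x1077be (`cut13`), the state `setup_free(p, c->codeword_lengths)` returned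
    v_after_call w_rsp_1077b9 w_mem_1077b9
    rw [hs32, hcnt] at hbr_107786
    replace hwc := hwc (by omega)
    refine ReachVia.done (Or.inr ⟨?_, ?_, hile, by omega, ?_⟩)
    · refine at_move hat ?_ w_rip ?_ (w_kept.get .rbx rfl) (w_kept.get .r15 rfl) w_code w_inv
      · u_same
      · rw [w_rsp, c_rsp]
    · rw [w_kept.get .r12 rfl]
      exact c_r12
    · rw [w_rbp, hsx, codebook_elem, toNat_addr _ (by omega)]

/-- 0x1077be (`cut13`, stb_vorbis_fixed.c:4262 `setup_free(p, c->multiplicands);`): the checked load of `c->multiplicands`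
(`[rbp + 0x20]`), then `setup_free`, which returns to `cut14`. -/
theorem piece_cut13 (H : D2Hyp Lay μ u₀) (hnz : stb_vorbis.codebooks e.mem (e.reg .rdi).toNat ≠ 0) {i : Nat}
    (hin : CbIn Vorbis.L.vorbis_deinit.cut13 others frames Blk u₀ e ret i v) :
    ReachVia Lay μ WayInv v (CbIn Vorbis.L.vorbis_deinit.cut14 others frames Blk u₀ e ret i) := by
  obtain ⟨hLay, hμ, hcode, h8, hsf, h4⟩ := H
  obtain ⟨hat, c_r12, hile, hlt, c_rbp⟩ := hin
  have he := hat.entry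
  v_entry he
  have c_rip := hat.rip
  obtain ⟨c_rsp, c_rbx, c_eq, hdf, hmx, hsse, hlive, hok, hd, hwp, -, -, -, -⟩ := d2_ctx hat
  have hsf' := hsf others frames
  obtain ⟨hc256, hwc⟩ := where_codebooks hat hnz
  replace hwc := hwc (by omega)
  u_walk hcode [hμ.vendor] span [Vorbis.L.textLo, Vorbis.L.textHi] side (v_side)
  case check_1077c2 =>
    have hun : ShadowUntouched v.mem s_1077c2.mem := by v_untouched
    exact chk_codebook hat hun hnz i hlt 32 8 (by decide) (by decide) _ (by u_omega)
  case call_inv =>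
    v_inv
  case pre_1077ce =>
    have hun : ShadowUntouched v.mem s_1077ce.mem := by v_untouched
    exact pre_free hat hun w_rsp w_rdi
  -- 0x1077d3, the state `setup_free` returned
  v_after_call w_rsp_1077ce w_mem_1077ce
  refine ReachVia.done ⟨?_, ?_, hile, hlt, ?_⟩
  · refine at_move hat ?_ w_rip ?_ (w_kept.get .rbx rfl) (w_kept.get .r15 rfl) w_code w_inv
    · u_same
    · rw [w_rsp, c_rsp]
  · rw [w_kept.get .r12 rfl]
    exact c_r12
  · rw [w_kept.get .rbp rfl]
    exact c_rbp

/-- 0x1077d3 (`cut14`, stb_vorbis_fixed.c:4263 `setup_free(p, c->codewords);`): the checked load of `c->codewords`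
(`[rbp + 0x28]`), then `setup_free`, which returns to `cut15`. -/
theorem piece_cut14 (H : D2Hyp Lay μ u₀) (hnz : stb_vorbis.codebooks e.mem (e.reg .rdi).toNat ≠ 0) {i : Nat}
    (hin : CbIn Vorbis.L.vorbis_deinit.cut14 others frames Blk u₀ e ret i v) :
    ReachVia Lay μ WayInv v (CbIn Vorbis.L.vorbis_deinit.cut15 others frames Blk u₀ e ret i) := by
  obtain ⟨hLay, hμ, hcode, h8, hsf, h4⟩ := H
  obtain ⟨hat, c_r12, hile, hlt, c_rbp⟩ := hin
  have he := hat.entry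
  v_entry he
  have c_rip := hat.rip
  obtain ⟨c_rsp, c_rbx, c_eq, hdf, hmx, hsse, hlive, hok, hd, hwp, -, -, -, -⟩ := d2_ctx hat
  have hsf' := hsf others frames
  obtain ⟨hc256, hwc⟩ := where_codebooks hat hnz
  replace hwc := hwc (by omega)
  u_walk hcode [hμ.vendor] span [Vorbis.L.textLo, Vorbis.L.textHi] side (v_side)
  case check_1077d7 =>
    have hun : ShadowUntouched v.mem s_1077d7.mem := by v_untouched
    exact chk_codebook hat hun hnz i hlt 40 8 (by decide) (by decide) _ (by u_omega)
  case call_inv =>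
    v_inv
  case pre_1077e3 =>
    have hun : ShadowUntouched v.mem s_1077e3.mem := by v_untouched
    exact pre_free hat hun w_rsp w_rdi
  -- 0x1077e8, the state `setup_free` returned
  v_after_call w_rsp_1077e3 w_mem_1077e3
  refine ReachVia.done ⟨?_, ?_, hile, hlt, ?_⟩
  · refine at_move hat ?_ w_rip ?_ (w_kept.get .rbx rfl) (w_kept.get .r15 rfl) w_code w_inv
    · u_same
    · rw [w_rsp, c_rsp]
  · rw [w_kept.get .r12 rfl]
    exact c_r12
  · rw [w_kept.get .rbp rfl]
    exact c_rbp

/-- 0x1077e8 (`cut15`, stb_vorbis_fixed.c:4264 `setup_free(p, c->sorted_codewords);`): the checked load of `c->sorted_codewords`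
(`[rbp + 0x830]`), then `setup_free`, which returns to `cut16`. -/
theorem piece_cut15 (H : D2Hyp Lay μ u₀) (hnz : stb_vorbis.codebooks e.mem (e.reg .rdi).toNat ≠ 0) {i : Nat}
    (hin : CbIn Vorbis.L.vorbis_deinit.cut15 others frames Blk u₀ e ret i v) :
    ReachVia Lay μ WayInv v (CbIn Vorbis.L.vorbis_deinit.cut16 others frames Blk u₀ e ret i) := by
  obtain ⟨hLay, hμ, hcode, h8, hsf, h4⟩ := H
  obtain ⟨hat, c_r12, hile, hlt, c_rbp⟩ := hin
  have he := hat.entry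
  v_entry he
  have c_rip := hat.rip
  obtain ⟨c_rsp, c_rbx, c_eq, hdf, hmx, hsse, hlive, hok, hd, hwp, -, -, -, -⟩ := d2_ctx hat
  have hsf' := hsf others frames
  obtain ⟨hc256, hwc⟩ := where_codebooks hat hnz
  replace hwc := hwc (by omega)
  u_walk hcode [hμ.vendor] span [Vorbis.L.textLo, Vorbis.L.textHi] side (v_side)
  case check_1077ef =>
    have hun : ShadowUntouched v.mem s_1077ef.mem := by v_untouched
    exact chk_codebook hat hun hnz i hlt 2096 8 (by decide) (by decide) _ (by u_omega)
  case call_inv =>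
    v_inv
  case pre_1077fe =>
    have hun : ShadowUntouched v.mem s_1077fe.mem := by v_untouched
    exact pre_free hat hun w_rsp w_rdi
  -- 0x107803, the state `setup_free` returned
  v_after_call w_rsp_1077fe w_mem_1077fe
  refine ReachVia.done ⟨?_, ?_, hile, hlt, ?_⟩
  · refine at_move hat ?_ w_rip ?_ (w_kept.get .rbx rfl) (w_kept.get .r15 rfl) w_code w_inv
    · u_same
    · rw [w_rsp, c_rsp]
  · rw [w_kept.get .r12 rfl]
    exact c_r12
  · rw [w_kept.get .rbp rfl]
    exact c_rbp

/-- 0x107803 (`cut16`, stb_vorbis_fixed.c:4266 `setup_free(p, c->sorted_values ? c->sorted_values-1 : NULL);`): the checked load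
of `c->sorted_values` (`[rbp + 0x838]`), `sub rsi, 4` on the value if it is not NULL (both arms join at 0x107767), then
`setup_free`, which returns to `cut11`, the back edge of the codebooks loop. -/
theorem piece_cut16 (H : D2Hyp Lay μ u₀) (hnz : stb_vorbis.codebooks e.mem (e.reg .rdi).toNat ≠ 0) {i : Nat}
    (hin : CbIn Vorbis.L.vorbis_deinit.cut16 others frames Blk u₀ e ret i v) :
    ReachVia Lay μ WayInv v (CbIn Vorbis.L.vorbis_deinit.cut11 others frames Blk u₀ e ret i) := by
  obtain ⟨hLay, hμ, hcode, h8, hsf, h4⟩ := H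
  obtain ⟨hat, c_r12, hile, hlt, c_rbp⟩ := hin
  have he := hat.entry
  v_entry he
  have c_rip := hat.rip
  obtain ⟨c_rsp, c_rbx, c_eq, hdf, hmx, hsse, hlive, hok, hd, hwp, -, -, -, -⟩ := d2_ctx hat
  have hsf' := hsf others frames
  obtain ⟨hc256, hwc⟩ := where_codebooks hat hnz
  replace hwc := hwc (by omega)
  u_walk hcode [hμ.vendor] span [Vorbis.L.textLo, Vorbis.L.textHi] side (v_side)
  case check_10780a =>
    have hun : ShadowUntouched v.mem s_10780a.mem := by v_untouched
    exact chk_codebook hat hun hnz i hlt 2104 8 (by decide) (by decide) _ (by u_omega)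
  -- `c->sorted_values = NULL`: `je` taken
  case call_inv =>
    v_inv
  case pre_10776a =>
    have hun : ShadowUntouched v.mem s_10776a.mem := by v_untouched
    exact pre_free hat hun w_rsp w_rdi
  -- `c->sorted_values ≠ NULL`: `sub rsi, 4 ; jmp`
  case call_inv =>
    v_inv
  case pre_10776a =>
    have hun : ShadowUntouched v.mem s_10776a.mem := by v_untouched
    exact pre_free hat hun w_rsp w_rdi
  -- 0x10776f, the state `setup_free` returned: once per arm
  · v_after_call w_rsp_10776a w_mem_10776a
    refine ReachVia.done ⟨?_, ?_, hile, hlt, ?_⟩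
    · refine at_move hat ?_ w_rip ?_ (w_kept.get .rbx rfl) (w_kept.get .r15 rfl) w_code w_inv
      · u_same
      · rw [w_rsp, c_rsp]
    · rw [w_kept.get .r12 rfl]
      exact c_r12
    · rw [w_kept.get .rbp rfl]
      exact c_rbp
  · v_after_call w_rsp_10776a w_mem_10776a
    refine ReachVia.done ⟨?_, ?_, hile, hlt, ?_⟩
    · refine at_move hat ?_ w_rip ?_ (w_kept.get .rbx rfl) (w_kept.get .r15 rfl) w_code w_inv
      · u_same
      · rw [w_rsp, c_rsp]
    · rw [w_kept.get .r12 rfl]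
      exact c_r12
    · rw [w_kept.get .rbp rfl]
      exact c_rbp

/-- 0x10776f (`cut11`, stb_vorbis_fixed.c:4259 `++i`): `add r12d, 1`, the back edge of the codebooks loop, to its head `cut12`. -/
theorem piece_cut11 (H : D2Hyp Lay μ u₀) (hnz : stb_vorbis.codebooks e.mem (e.reg .rdi).toNat ≠ 0) {i : Nat}
    (hin : CbIn Vorbis.L.vorbis_deinit.cut11 others frames Blk u₀ e ret i v) :
    ReachVia Lay μ WayInv v (AtLoopHead Vorbis.L.vorbis_deinit.cut12 others frames Blk u₀ e ret (i + 1)) := by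
  obtain ⟨hLay, hμ, hcode, h8, hsf, h4⟩ := H
  obtain ⟨hat, c_r12, hile, hlt, c_rbp⟩ := hin
  have he := hat.entry
  v_entry he
  have c_rip := hat.rip
  obtain ⟨c_rsp, c_rbx, c_eq, hdf, hmx, hsse, hlive, hok, hd, hwp, -, -, -, -⟩ := d2_ctx hat
  obtain ⟨hc256, -⟩ := where_codebooks hat hnz
  u_walk hcode [hμ.vendor] until [Vorbis.L.vorbis_deinit.cut12] span [Vorbis.L.textLo, Vorbis.L.textHi] side (v_side)
  -- 0x107773, the loop head again
  refine ReachVia.done ⟨?_, ?_, by omega⟩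
  · refine at_move hat ?_ w_rip ?_ (w_kept.get .rbx rfl) (w_kept.get .r15 rfl) (Vorbis.conv_code_in w_eq) ?_
    · rw [w_mem]
      exact Mem.SameExcept.refl _ _
    · exact w_kept.get .rsp rfl
    · v_inv
  · rw [w_r12]
    exact inc_small _ i c_r12 (by omega)

/-! ### The mapping loop (stb_vorbis_fixed.c:4273 – 4274), piece by piece -/

/-- 0x1078d5 (`cut21`, the head of the mapping loop, stb_vorbis_fixed.c:4273 `i < p->mapping_count`): the checked load of
`mapping_count`; BODY (`jg`): `p->mapping[i]` with the stride 56 (FIX 8), the checked load of `.chan` (`[rbp + 8]`), `setup_free`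
(4274), which returns to `cut20`; EXIT: the checked load of `p->mapping`, `setup_free(p, p->mapping)` (4275), which returns to
`cut22`, the end of the segment. -/
theorem piece_cut21 (H : D2Hyp Lay μ u₀) (hnz : stb_vorbis.mapping e.mem (e.reg .rdi).toNat ≠ 0) {i : Nat}
    (hin : AtLoopHead Vorbis.L.vorbis_deinit.cut21 others frames Blk u₀ e ret i v) :
    ReachVia Lay μ WayInv v (fun r => vorbis_deinit.At Vorbis.L.vorbis_deinit.cut22 others frames Blk u₀ e ret r ∨
      MpIn Vorbis.L.vorbis_deinit.cut20 others frames Blk u₀ e ret i r) := by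
  obtain ⟨hLay, hμ, hcode, h8, hsf, h4⟩ := H
  obtain ⟨hat, c_r12, hile⟩ := hin
  have he := hat.entry
  v_entry he
  have c_rip := hat.rip
  obtain ⟨c_rsp, c_rbx, c_eq, hdf, hmx, hsse, hlive, hok, hd, hwp, -, -, hmps, hmpc⟩ := d2_ctx hat
  have hsf' := hsf others frames
  obtain ⟨hc64, hwc⟩ := where_mapping hat hnz
  -- the two fields the head loads, named
  have ea464 : e.reg .rdi + 464 = addr ((e.reg .rdi).toNat + 464) := by
    rw [← addr_add_lit, addr_toNat]
  have ea472 : e.reg .rdi + 472 = addr ((e.reg .rdi).toNat + 472) := by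
    rw [← addr_add_lit, addr_toNat]
  have r464 : v.mem.readLE (e.reg .rdi + 464) 4 = v.mem.u32 ((e.reg .rdi).toNat + 464) := by
    rw [ea464]
    rfl
  have r472 : v.mem.readLE (e.reg .rdi + 472) 8 = stb_vorbis.mapping e.mem (e.reg .rdi).toNat := by
    rw [ea472, ← hmps]
    rfl
  have hs32 := s32_small _ i c_r12 (by omega)
  have hsx := sext_small _ i c_r12 (by omega)
  have hcnt : (BitVec.ofNat 32 (v.mem.u32 ((e.reg .rdi).toNat + 464))).toInt =
      stb_vorbis.mapping_count e.mem (e.reg .rdi).toNat := by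
    rw [cmp_i32, ← hmpc]
    rfl
  u_walk hcode [hμ.vendor] span [Vorbis.L.textLo, Vorbis.L.textHi] side (v_side)
  case check_1078dc =>
    have hun : ShadowUntouched v.mem s_1078dc.mem := by v_untouched
    exact chk_obj hat hun 464 4 (by decide) (by decide) _ (by u_omega)
  -- the body arm: `i < mapping_count`
  case check_10789e =>
    have hun : ShadowUntouched v.mem s_10789e.mem := by v_untouched
    exact chk_obj hat hun 472 8 (by decide) (by decide) _ (by u_omega)
  case check_1078c0 =>
    have hun : ShadowUntouched v.mem s_1078c0.mem := by v_untouched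
    rw [hs32, hcnt] at hbr_1078e8
    replace hwc := hwc (by omega)
    rw [hsx, mapping_elem]
    refine chk_mapping hat hun hnz i (by omega) 8 8 (by decide) (by decide) _ ?_
    rw [addr_add_lit, toNat_addr _ (by omega)]
  case call_inv =>
    v_inv
  case pre_1078cc =>
    have hun : ShadowUntouched v.mem s_1078cc.mem := by v_untouched
    exact pre_free hat hun w_rsp w_rdi
  -- the exit arm: `i ≥ mapping_count`
  case check_1078f1 =>
    have hun : ShadowUntouched v.mem s_1078f1.mem := by v_untouched
    exact chk_obj hat hun 472 8 (by decide) (by decide) _ (by u_omega)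
  case call_inv =>
    v_inv
  case pre_107900 =>
    have hun : ShadowUntouched v.mem s_107900.mem := by v_untouched
    exact pre_free hat hun w_rsp w_rdi
  · -- 0x1078d1 (`cut20`), the state `setup_free(p, p->mapping[i].chan)` returned
    v_after_call w_rsp_1078cc w_mem_1078cc
    rw [hs32, hcnt] at hbr_1078e8
    replace hwc := hwc (by omega)
    refine ReachVia.done (Or.inr ⟨?_, ?_, hile, by omega, ?_⟩)
    · refine at_move hat ?_ w_rip ?_ (w_kept.get .rbx rfl) (w_kept.get .r15 rfl) w_code w_inv
      · u_same
      · rw [w_rsp, c_rsp]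
    · rw [w_kept.get .r12 rfl]
      exact c_r12
    · rw [w_rbp, hsx, mapping_elem, toNat_addr _ (by omega)]
  · -- 0x107905 (`cut22`), the state `setup_free(p, p->mapping)` returned
    v_after_call w_rsp_107900 w_mem_107900
    refine ReachVia.done (Or.inl ?_)
    refine at_move hat ?_ w_rip ?_ (w_kept.get .rbx rfl) (w_kept.get .r15 rfl) w_code w_inv
    · u_same
    · rw [w_rsp, c_rsp]

/-- 0x1078d1 (`cut20`, stb_vorbis_fixed.c:4273 `++i`): `add r12d, 1`, the back edge of the mapping loop, to its head `cut21`. -/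
theorem piece_cut20 (H : D2Hyp Lay μ u₀) (hnz : stb_vorbis.mapping e.mem (e.reg .rdi).toNat ≠ 0) {i : Nat}
    (hin : MpIn Vorbis.L.vorbis_deinit.cut20 others frames Blk u₀ e ret i v) :
    ReachVia Lay μ WayInv v (AtLoopHead Vorbis.L.vorbis_deinit.cut21 others frames Blk u₀ e ret (i + 1)) := by
  obtain ⟨hLay, hμ, hcode, h8, hsf, h4⟩ := H
  obtain ⟨hat, c_r12, hile, hlt, c_rbp⟩ := hin
  have he := hat.entry
  v_entry he
  have c_rip := hat.rip
  obtain ⟨c_rsp, c_rbx, c_eq, hdf, hmx, hsse, hlive, hok, hd, hwp, -, -, -, -⟩ := d2_ctx hat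
  obtain ⟨hc64, -⟩ := where_mapping hat hnz
  u_walk hcode [hμ.vendor] until [Vorbis.L.vorbis_deinit.cut21] span [Vorbis.L.textLo, Vorbis.L.textHi] side (v_side)
  -- 0x1078d5, the loop head again
  refine ReachVia.done ⟨?_, ?_, by omega⟩
  · refine at_move hat ?_ w_rip ?_ (w_kept.get .rbx rfl) (w_kept.get .r15 rfl) (Vorbis.conv_code_in w_eq) ?_
    · rw [w_mem]
      exact Mem.SameExcept.refl _ _
    · exact w_kept.get .rsp rfl
    · v_inv
  · rw [w_r12]
    exact inc_small _ i c_r12 (by omega)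

/-! ### The straight pieces: the two NULL tests, `floor_config`, `residue_config` -/

/-- 0x107745 (`cut10`, the entry of the segment, stb_vorbis_fixed.c:4257 `if (p->codebooks) {`): the checked load of
`p->codebooks`; NULL (`je`): to `cut17`; otherwise `i = 0` and to the head of the codebooks loop, `cut12`. -/
theorem piece_cut10 (H : D2Hyp Lay μ u₀) (hat : vorbis_deinit.At Vorbis.L.vorbis_deinit.cut10 others frames Blk u₀ e ret v) :
    ReachVia Lay μ WayInv v (fun r => vorbis_deinit.At Vorbis.L.vorbis_deinit.cut17 others frames Blk u₀ e ret r ∨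
      (stb_vorbis.codebooks e.mem (e.reg .rdi).toNat ≠ 0 ∧
        AtLoopHead Vorbis.L.vorbis_deinit.cut12 others frames Blk u₀ e ret 0 r)) := by
  obtain ⟨hLay, hμ, hcode, h8, hsf, h4⟩ := H
  have he := hat.entry
  v_entry he
  have c_rip := hat.rip
  obtain ⟨c_rsp, c_rbx, c_eq, hdf, hmx, hsse, hlive, hok, hd, hwp, hcbs, -, -, -⟩ := d2_ctx hat
  have ea168 : e.reg .rdi + 168 = addr ((e.reg .rdi).toNat + 168) := by
    rw [← addr_add_lit, addr_toNat]
  have r168 : v.mem.readLE (e.reg .rdi + 168) 8 = stb_vorbis.codebooks e.mem (e.reg .rdi).toNat := by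
    rw [ea168, ← hcbs]
    rfl
  u_walk hcode [hμ.vendor] until [Vorbis.L.vorbis_deinit.cut17, Vorbis.L.vorbis_deinit.cut12]
    span [Vorbis.L.textLo, Vorbis.L.textHi] side (v_side)
  case check_10774c =>
    have hun : ShadowUntouched v.mem s_10774c.mem := by v_untouched
    exact chk_obj hat hun 168 8 (by decide) (by decide) _ (by u_omega)
  · -- 0x107843 (`cut17`): `p->codebooks = NULL`
    refine ReachVia.done (Or.inl ?_)
    refine at_move hat ?_ w_rip ?_ (w_kept.get .rbx rfl) (w_kept.get .r15 rfl) (Vorbis.conv_code_in w_eq) ?_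
    · rw [w_mem]
      u_same
    · exact w_rsp.trans c_rsp.symm
    · v_inv
  · -- 0x107773 (`cut12`): the head of the codebooks loop, `i = 0`
    refine ReachVia.done (Or.inr ⟨?_, ?_, ?_, by omega⟩)
    · intro hz
      rw [hz] at hbr_107759
      exact hbr_107759 rfl
    · refine at_move hat ?_ w_rip ?_ (w_kept.get .rbx rfl) (w_kept.get .r15 rfl) (Vorbis.conv_code_in w_eq) ?_
      · rw [w_mem]
        u_same
      · exact w_rsp.trans c_rsp.symm
      · v_inv
    · rw [w_r12]
      rfl

/-- 0x107843 (`cut17`, stb_vorbis_fixed.c:4270 `setup_free(p, p->floor_config);`): the checked load of `p->floor_config`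
(`[rbx + 0x138]`), then `setup_free`, which returns to `cut18`. -/
theorem piece_cut17 (H : D2Hyp Lay μ u₀) (hat : vorbis_deinit.At Vorbis.L.vorbis_deinit.cut17 others frames Blk u₀ e ret v) :
    ReachVia Lay μ WayInv v (vorbis_deinit.At Vorbis.L.vorbis_deinit.cut18 others frames Blk u₀ e ret) := by
  obtain ⟨hLay, hμ, hcode, h8, hsf, h4⟩ := H
  have he := hat.entry
  v_entry he
  have c_rip := hat.rip
  obtain ⟨c_rsp, c_rbx, c_eq, hdf, hmx, hsse, hlive, hok, hd, hwp, -, -, -, -⟩ := d2_ctx hat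
  have hsf' := hsf others frames
  u_walk hcode [hμ.vendor] span [Vorbis.L.textLo, Vorbis.L.textHi] side (v_side)
  case check_10784a =>
    have hun : ShadowUntouched v.mem s_10784a.mem := by v_untouched
    exact chk_obj hat hun 312 8 (by decide) (by decide) _ (by u_omega)
  case call_inv =>
    v_inv
  case pre_107859 =>
    have hun : ShadowUntouched v.mem s_107859.mem := by v_untouched
    exact pre_free hat hun w_rsp w_rdi
  -- 0x10785e, the state `setup_free` returned
  v_after_call w_rsp_107859 w_mem_107859
  refine ReachVia.done ?_
  refine at_move hat ?_ w_rip ?_ (w_kept.get .rbx rfl) (w_kept.get .r15 rfl) w_code w_inv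
  · u_same
  · rw [w_rsp, c_rsp]

/-- 0x10785e (`cut18`, stb_vorbis_fixed.c:4271 `setup_free(p, p->residue_config);`): the checked load of `p->residue_config`
(`[rbx + 0x1c8]`), then `setup_free`, which returns to `cut19`. -/
theorem piece_cut18 (H : D2Hyp Lay μ u₀) (hat : vorbis_deinit.At Vorbis.L.vorbis_deinit.cut18 others frames Blk u₀ e ret v) :
    ReachVia Lay μ WayInv v (vorbis_deinit.At Vorbis.L.vorbis_deinit.cut19 others frames Blk u₀ e ret) := by
  obtain ⟨hLay, hμ, hcode, h8, hsf, h4⟩ := H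
  have he := hat.entry
  v_entry he
  have c_rip := hat.rip
  obtain ⟨c_rsp, c_rbx, c_eq, hdf, hmx, hsse, hlive, hok, hd, hwp, -, -, -, -⟩ := d2_ctx hat
  have hsf' := hsf others frames
  u_walk hcode [hμ.vendor] span [Vorbis.L.textLo, Vorbis.L.textHi] side (v_side)
  case check_107865 =>
    have hun : ShadowUntouched v.mem s_107865.mem := by v_untouched
    exact chk_obj hat hun 456 8 (by decide) (by decide) _ (by u_omega)
  case call_inv =>
    v_inv
  case pre_107874 =>
    have hun : ShadowUntouched v.mem s_107874.mem := by v_untouched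
    exact pre_free hat hun w_rsp w_rdi
  -- 0x107879, the state `setup_free` returned
  v_after_call w_rsp_107874 w_mem_107874
  refine ReachVia.done ?_
  refine at_move hat ?_ w_rip ?_ (w_kept.get .rbx rfl) (w_kept.get .r15 rfl) w_code w_inv
  · u_same
  · rw [w_rsp, c_rsp]

/-- 0x107879 (`cut19`, stb_vorbis_fixed.c:4272 `if (p->mapping) {`): the checked load of `p->mapping`; NULL (`je`): to `cut22`,
the end of the segment; otherwise `i = 0` and to the head of the mapping loop, `cut21`. -/
theorem piece_cut19 (H : D2Hyp Lay μ u₀) (hat : vorbis_deinit.At Vorbis.L.vorbis_deinit.cut19 others frames Blk u₀ e ret v) :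
    ReachVia Lay μ WayInv v (fun r => vorbis_deinit.At Vorbis.L.vorbis_deinit.cut22 others frames Blk u₀ e ret r ∨
      (stb_vorbis.mapping e.mem (e.reg .rdi).toNat ≠ 0 ∧
        AtLoopHead Vorbis.L.vorbis_deinit.cut21 others frames Blk u₀ e ret 0 r)) := by
  obtain ⟨hLay, hμ, hcode, h8, hsf, h4⟩ := H
  have he := hat.entry
  v_entry he
  have c_rip := hat.rip
  obtain ⟨c_rsp, c_rbx, c_eq, hdf, hmx, hsse, hlive, hok, hd, hwp, -, -, hmps, -⟩ := d2_ctx hat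
  have ea472 : e.reg .rdi + 472 = addr ((e.reg .rdi).toNat + 472) := by
    rw [← addr_add_lit, addr_toNat]
  have r472 : v.mem.readLE (e.reg .rdi + 472) 8 = stb_vorbis.mapping e.mem (e.reg .rdi).toNat := by
    rw [ea472, ← hmps]
    rfl
  u_walk hcode [hμ.vendor] until [Vorbis.L.vorbis_deinit.cut22, Vorbis.L.vorbis_deinit.cut21]
    span [Vorbis.L.textLo, Vorbis.L.textHi] side (v_side)
  case check_107880 =>
    have hun : ShadowUntouched v.mem s_107880.mem := by v_untouched
    exact chk_obj hat hun 472 8 (by decide) (by decide) _ (by u_omega)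
  · -- 0x107905 (`cut22`): `p->mapping = NULL`
    refine ReachVia.done (Or.inl ?_)
    refine at_move hat ?_ w_rip ?_ (w_kept.get .rbx rfl) (w_kept.get .r15 rfl) (Vorbis.conv_code_in w_eq) ?_
    · rw [w_mem]
      u_same
    · exact w_rsp.trans c_rsp.symm
    · v_inv
  · -- 0x1078d5 (`cut21`): the head of the mapping loop, `i = 0`
    refine ReachVia.done (Or.inr ⟨?_, ?_, ?_, by omega⟩)
    · intro hz
      rw [hz] at hbr_10788d
      exact hbr_10788d rfl
    · refine at_move hat ?_ w_rip ?_ (w_kept.get .rbx rfl) (w_kept.get .r15 rfl) (Vorbis.conv_code_in w_eq) ?_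
      · rw [w_mem]
        u_same
      · exact w_rsp.trans c_rsp.symm
      · v_inv
    · rw [w_r12]
      rfl

end Vorbis.Spec.vorbis_deinit_2
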